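-- pv_equiv track=rewrite | github.com/AndreBFarias/protocolo-ouroboros | src/intake/inbox_reader.py | agrupar_duplicatas
-- ===== SOURCE A (Python) =====
-- def agrupar_duplicatas(itens: list[dict]) -> dict[str, int]:
--     """Conta ocorrências por sha8 (primeiros 8 chars do sha256).
--
--     Returns:
--         Dict ``{sha8: contador}`` apenas para sha8 com contador > 1.
--         Sha8 com 1 ocorrência são omitidos (foco em duplicatas reais).
--     """
--     contagem: dict[str, int] = {}
--     for it in itens:
--         sha = it.get("sha256", "")
--         if not sha:
--             continue
--         sha8 = sha[:8]
--         contagem[sha8] = contagem.get(sha8, 0) + 1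
--     return {sha8: c for sha8, c in contagem.items() if c > 1}
-- ===== SOURCE B (Python) =====
-- def agrupar_duplicatas(itens: list[dict]) -> dict[str, int]:
--     """Conta ocorrencias por sha8: recontagem global por prefixo distinto,
--     em vez de um dict de contadores incrementais."""
--     shas = [it.get("sha256", "")[:8] for it in itens if it.get("sha256", "")]
--     out: dict[str, int] = {}
--     for s in shas:
--         if s not in out:
--             c = shas.count(s)
--             if c > 1:
--                 out[s] = c
--     return out
-- ===== Notes on version B (the rewrite author's own statement) =====
-- stated objective: alternative
-- what changed: Instead of maintaining an incremental counter dict while scanning the items, B first extracts the list of sha8 prefixes, then for each prefix not yet emitted recounts it globally with list.count and emits it only when the count exceeds 1.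
import Mathlib
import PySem

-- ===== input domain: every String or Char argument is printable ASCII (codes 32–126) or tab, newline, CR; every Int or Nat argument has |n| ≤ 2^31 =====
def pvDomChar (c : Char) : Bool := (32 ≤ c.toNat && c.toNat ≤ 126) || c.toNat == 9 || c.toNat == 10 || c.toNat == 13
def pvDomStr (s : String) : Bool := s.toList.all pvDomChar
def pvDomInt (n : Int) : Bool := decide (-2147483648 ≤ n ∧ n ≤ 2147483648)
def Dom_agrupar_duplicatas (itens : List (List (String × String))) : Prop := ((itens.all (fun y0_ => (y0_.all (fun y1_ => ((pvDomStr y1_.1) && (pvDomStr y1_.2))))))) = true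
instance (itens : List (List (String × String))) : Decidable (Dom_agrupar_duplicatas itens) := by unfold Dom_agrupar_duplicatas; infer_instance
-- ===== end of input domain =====

-- B replaces A's incremental counter dict by extracting the sha8 list once and
-- recounting each not-yet-emitted prefix globally with list.count (alternative decomposition, not faster).

-- ===== PORT A =====
def agrupar_duplicatas (itens : List (List (String × String))) : List (String × Int) :=
  let contagem : PySem.Dict String Int :=
    itens.foldl (fun contagem it =>
      let sha := PySem.Dict.getD (PySem.Dict.mk it) "sha256" ""
      if sha = "" then contagem
      else
        let sha8 := PySem.Str.slice sha none (some 8)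
        contagem.insert sha8 (contagem.getD sha8 0 + 1)) PySem.Dict.empty
  -- dict comprehension {sha8: c for sha8, c in contagem.items() if c > 1}
  (contagem.items.foldl (fun d p => if 1 < p.2 then d.insert p.1 p.2 else d)
    PySem.Dict.empty).items

-- ===== PORT B =====
def agrupar_duplicatas_alt (itens : List (List (String × String))) : List (String × Int) :=
  let shas : List String :=
    (itens.filter (fun it => ¬ (PySem.Dict.getD (PySem.Dict.mk it) "sha256" "" = ""))).map
      (fun it => PySem.Str.slice (PySem.Dict.getD (PySem.Dict.mk it) "sha256" "") none (some 8))
  let out : PySem.Dict String Int :=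
    shas.foldl (fun out s =>
      if ¬ out.contains s then
        if 1 < (PySem.List.count shas s : Int) then out.insert s (PySem.List.count shas s : Int)
        else out
      else out) PySem.Dict.empty
  out.items

-- ===== PRECONDITION & SPEC =====
def Spec_agrupar_duplicatas (itens : List (List (String × String))) (out : List (String × Int)) : Prop := out = agrupar_duplicatas_alt itens
instance (itens : List (List (String × String))) (out : List (String × Int)) : Decidable (Spec_agrupar_duplicatas itens out) := by unfold Spec_agrupar_duplicatas; infer_instance

-- ===== CLAIM (what is proved, stated in full; the proofs are below) =====
def Claim_equal_agrupar_duplicatas : Prop := ∀ (itens : List (List (String × String))), Dom_agrupar_duplicatas itens → Spec_agrupar_duplicatas itens (agrupar_duplicatas itens)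

-- ===== LEMMAS AND PROOFS =====

-- A's counting loop over itens is the Counter of the extracted sha8 list.
theorem agrupar_A_counter (itens : List (List (String × String))) :
    (itens.foldl (fun contagem it =>
      if PySem.Dict.getD (PySem.Dict.mk it) "sha256" "" = "" then contagem
      else
        contagem.insert (PySem.Str.slice (PySem.Dict.getD (PySem.Dict.mk it) "sha256" "") none (some 8))
          (contagem.getD (PySem.Str.slice (PySem.Dict.getD (PySem.Dict.mk it) "sha256" "") none (some 8)) 0 + 1)) PySem.Dict.empty)
    = PySem.Dict.counter
        ((itens.filter (fun it => ¬ (PySem.Dict.getD (PySem.Dict.mk it) "sha256" "" = ""))).map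
          (fun it => PySem.Str.slice (PySem.Dict.getD (PySem.Dict.mk it) "sha256" "") none (some 8))) := by
  have hfun : (fun (contagem : PySem.Dict String Int) it =>
      if PySem.Dict.getD (PySem.Dict.mk it) "sha256" "" = "" then contagem
      else
        contagem.insert (PySem.Str.slice (PySem.Dict.getD (PySem.Dict.mk it) "sha256" "") none (some 8))
          (contagem.getD (PySem.Str.slice (PySem.Dict.getD (PySem.Dict.mk it) "sha256" "") none (some 8)) 0 + 1))
    = (fun (contagem : PySem.Dict String Int) it =>
      if ¬ (PySem.Dict.getD (PySem.Dict.mk it) "sha256" "" = "") then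
        contagem.insert (PySem.Str.slice (PySem.Dict.getD (PySem.Dict.mk it) "sha256" "") none (some 8))
          (contagem.getD (PySem.Str.slice (PySem.Dict.getD (PySem.Dict.mk it) "sha256" "") none (some 8)) 0 + 1)
      else contagem) := by
    funext d it
    by_cases h : PySem.Dict.getD (PySem.Dict.mk it) "sha256" "" = "" <;> simp [h]
  rw [hfun, PySem.List.foldl_ite_eq_foldl_filter,
    ← List.foldl_map (f := fun it => PySem.Str.slice (PySem.Dict.getD (PySem.Dict.mk it) "sha256" "") none (some 8)) (g := fun (d : PySem.Dict String Int) s => d.insert s (d.getD s 0 + 1)),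
    PySem.Dict.foldl_insert_getD_add_one_eq_counter]

-- A's dict comprehension over an items list with distinct keys is a filter.
theorem comprehension_filter (l : List (String × Int)) (h : (l.map Prod.fst).Nodup) :
    (l.foldl (fun d p => if 1 < p.2 then d.insert p.1 p.2 else d) PySem.Dict.empty).items
    = l.filter (fun p => 1 < p.2) := by
  rw [PySem.List.foldl_ite_eq_foldl_filter]
  rw [PySem.Dict.items_foldl_insert_fresh (l.filter (fun x => decide (1 < x.2))) Prod.fst Prod.snd
    PySem.Dict.empty
    (fun a _ => by simp [PySem.Dict.contains_empty])
    (((List.filter_sublist).map Prod.fst).nodup h)]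
  simp [PySem.Dict.empty]

theorem set_add_of_mem {s : PySem.Set String} {x : String} (h : x ∈ s) :
    PySem.Set.add s x = s := by
  simp [PySem.Set.add, PySem.Set.contains, h]

theorem set_add_of_not_mem {s : PySem.Set String} {x : String} (h : x ∉ s) :
    PySem.Set.add s x = s ++ [x] := by
  simp [PySem.Set.add, PySem.Set.contains, h]

-- B's loop: its dict is exactly the duplicated prefixes, in first-occurrence order.
theorem agrupar_B_loop (shas p : List String) :
    (p.foldl (fun out s =>
      if ¬ out.contains s then
        if 1 < (PySem.List.count shas s : Int) then out.insert s (PySem.List.count shas s : Int) else out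
      else out) PySem.Dict.empty).items
    = ((PySem.Set.ofList p).filter (fun s => 1 < (PySem.List.count shas s : Int))).map
        (fun s => (s, (PySem.List.count shas s : Int))) := by
  induction p using List.reverseRecOn with
  | nil => simp [PySem.Set.ofList, PySem.Dict.empty]
  | append_singleton p s ih =>
    rw [List.foldl_append]
    simp only [List.foldl_cons, List.foldl_nil]
    have hof : PySem.Set.ofList (p ++ [s]) = PySem.Set.add (PySem.Set.ofList p) s := by
      rw [PySem.Set.ofList_eq_foldl, PySem.Set.ofList_eq_foldl, List.foldl_append]
      rfl
    set O := (p.foldl (fun out s =>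
      if ¬ out.contains s then
        if 1 < (PySem.List.count shas s : Int) then out.insert s (PySem.List.count shas s : Int) else out
      else out) PySem.Dict.empty) with hO
    have hkeys : O.keys = (PySem.Set.ofList p).filter (fun s => 1 < (PySem.List.count shas s : Int)) := by
      show O.items.map Prod.fst = _
      rw [ih, List.map_map]
      simp [Function.comp_def]
    have hcont : O.contains s = decide (s ∈ PySem.Set.ofList p ∧ 1 < (PySem.List.count shas s : Int)) := by
      rw [PySem.Dict.contains_eq_decide_mem_keys, hkeys]
      simp only [List.mem_filter, decide_eq_decide]
      constructor
      · rintro ⟨hm, hq⟩; exact ⟨hm, of_decide_eq_true hq⟩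
      · rintro ⟨hm, hq⟩; exact ⟨hm, decide_eq_true hq⟩
    rw [hof]
    by_cases hc : s ∈ PySem.Set.ofList p ∧ 1 < (PySem.List.count shas s : Int)
    · have h1 : O.contains s = true := by rw [hcont]; exact decide_eq_true hc
      rw [set_add_of_mem hc.1]
      simp [h1, ih]
    · have h1 : O.contains s = false := by rw [hcont]; exact decide_eq_false hc
      have hcond : ¬ O.contains s = true := by simp [h1]
      rw [if_pos hcond]
      by_cases hq : 1 < (PySem.List.count shas s : Int)
      · have hmem : s ∉ PySem.Set.ofList p := fun hm => hc ⟨hm, hq⟩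
        rw [if_pos hq, PySem.Dict.items_insert_of_not_contains _ _ h1, ih,
          set_add_of_not_mem hmem]
        rw [List.filter_append, List.map_append]
        congr 1
        have hqd : decide (1 < (PySem.List.count shas s : Int)) = true := decide_eq_true hq
        simp only [List.filter_cons, List.filter_nil, hqd, if_true, List.map_cons, List.map_nil]
      · rw [if_neg hq, ih]
        rcases em (s ∈ PySem.Set.ofList p) with hm | hm
        · rw [set_add_of_mem hm]
        · rw [set_add_of_not_mem hm, List.filter_append]
          have hqd : decide (1 < (PySem.List.count shas s : Int)) = false := decide_eq_false hq
          simp only [List.filter_cons, List.filter_nil, hqd, Bool.false_eq_true, if_false, List.append_nil]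

-- ===== VERDICT (by name: the statement is the Claim_ definition above) =====
theorem agrupar_duplicatas_spec : Claim_equal_agrupar_duplicatas := by
  intro itens _
  show agrupar_duplicatas itens = agrupar_duplicatas_alt itens
  unfold agrupar_duplicatas agrupar_duplicatas_alt
  rw [agrupar_A_counter, agrupar_B_loop]
  rw [comprehension_filter _ (by
    have := PySem.Dict.nodup_keys_counter (xs :=
      (itens.filter (fun it => ¬ (PySem.Dict.getD (PySem.Dict.mk it) "sha256" "" = ""))).map
        (fun it => PySem.Str.slice (PySem.Dict.getD (PySem.Dict.mk it) "sha256" "") none (some 8)))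
    exact this)]
  rw [PySem.Dict.items_counter, List.filter_map]
  simp [Function.comp_def]
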